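-- pv_equiv track=rewrite | github.com/QuHarmonics/Nexus-4-Framework-Recursive-Harmonic-Architecture | Python Code - Raw Dump/Nexus 4 Framework -Untitled2-code_9- Qu Harmonics.py | unfold_hash_base_conversion_fixed
-- ===== SOURCE A (Python) =====
-- def unfold_hash_base_conversion_fixed(hash_value, max_base=16, target_base=2):
--     """
--     Unfold a hash by recursively converting from higher bases (16) down to lower bases (2).
--     Handles invalid values for each base.
--     """
--     unfolded_data = []
--
--     def base_conversion(value, current_base, target_base):
--         """
--         Convert a number from one base to another.
--         Handles invalid values gracefully.
--         """
--         try: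
--             decimal_value = int(value, current_base)
--         except ValueError:
--             return []  # Skip invalid values for the base
--         target_representation = []
--         while decimal_value > 0:
--             target_representation.append(decimal_value % target_base)
--             decimal_value //= target_base
--         return target_representation[::-1]
--
--     # Split the hash into chunks for processing
--     hash_chunks = [hash_value[i:i+1] for i in range(len(hash_value))]
--
--     for chunk in hash_chunks:
--         current_data = []
--         current_base = max_base
--         while current_base >= target_base:
--             # Convert from current base to target base
--             converted_chunk = base_conversion(chunk, current_base, target_base)
--             current_data.extend(converted_chunk)
--             current_base -= 1  # Reduce the base for the next iteration
--         unfolded_data.extend(current_data)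
--
--     return unfolded_data
-- ===== SOURCE B (Python) =====
-- def unfold_hash_base_conversion_fixed(hash_value, max_base=16, target_base=2):
--     """
--     Per character: extract its digit value once with int(ch, 36), count in closed
--     form how many bases in [target_base, max_base] accept it, and emit its
--     target_base digits repeated that many times.
--     """
--     unfolded = []
--     hi = min(max_base, 36)
--     for ch in hash_value:
--         try:
--             value = int(ch, 36)
--         except ValueError:
--             continue
--         count = hi - max(value + 1, target_base) + 1
--         if count <= 0:
--             continue
--         bits = []
--         n = value
--         while n > 0:
--             bits.append(n % target_base)
--             n //= target_base
--         unfolded.extend(bits[::-1] * count)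
--     return unfolded
-- ===== Notes on version B (the rewrite author's own statement) =====
-- stated objective: simpler
-- what changed: A probes every base from max_base down to target_base with a fresh int() call and re-runs the digit-conversion loop per base; B extracts each character's digit value once with int(ch, 36), computes the number of accepting bases as the closed form min(max_base,36) - max(value+1, target_base) + 1, and emits the digit list repeated that many times, removing the inner per-base loop.
-- outside the precondition, e.g. on unfold_hash_base_conversion_fixed('5', 3, -2): A returns [-1], B returns []; on unfold_hash_base_conversion_fixed('z', 16, 0): A returns [], B returns []
import Mathlib
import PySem

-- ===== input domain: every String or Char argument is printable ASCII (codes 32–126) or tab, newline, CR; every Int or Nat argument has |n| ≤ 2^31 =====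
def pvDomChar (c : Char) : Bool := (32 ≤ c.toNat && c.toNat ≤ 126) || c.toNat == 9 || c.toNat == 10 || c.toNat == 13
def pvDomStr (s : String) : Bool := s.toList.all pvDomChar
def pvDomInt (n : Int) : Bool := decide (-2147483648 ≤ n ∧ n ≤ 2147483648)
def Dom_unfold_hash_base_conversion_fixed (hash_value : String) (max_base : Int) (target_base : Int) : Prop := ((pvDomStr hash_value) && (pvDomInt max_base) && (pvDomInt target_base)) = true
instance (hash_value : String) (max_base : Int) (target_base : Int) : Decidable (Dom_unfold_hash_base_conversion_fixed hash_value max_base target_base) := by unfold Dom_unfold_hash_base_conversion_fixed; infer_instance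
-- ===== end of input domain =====

-- B replaces A's inner per-base conversion loop by one digit-value extraction plus a
-- closed-form count of the accepting bases (objective: simpler).

-- ===== PORT A =====
-- inner while-loop of base_conversion; the '2 ≤ tb' conjunct in the guard is a totality
-- guard only (Pre_ guarantees it; Python raises/diverges for target_base ≤ 1)
def pvDigitsLoop (v tb : Int) (acc : List Int) : List Int :=
  if h : 0 < v ∧ 2 ≤ tb then
    pvDigitsLoop (PySem.Int.floordiv v tb) tb (acc ++ [PySem.Int.mod v tb])
  else acc
termination_by v.toNat
decreasing_by
  have h3 : PySem.Int.floordiv v tb < v :=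
    (PySem.Int.floordiv_lt_iff_lt_mul (by omega)).mpr (by nlinarith [h.1, h.2])
  have h4 : 0 ≤ PySem.Int.floordiv v tb :=
    (PySem.Int.le_floordiv_iff_mul_le (by omega)).mpr (by omega)
  omega

-- base_conversion: int(value, current_base) on the 1-char chunk is
-- PySem.Int.ofCharsBase? (exact; none = ValueError, including an invalid base)
def pvBaseConversion (c : Char) (cur tb : Int) : List Int :=
  match PySem.Int.ofCharsBase? [c] cur with
  | none => []
  | some v => (pvDigitsLoop v tb []).reverse

-- the 'while current_base >= target_base' loop of A, carrying current_data
def pvBaseLoop (c : Char) (cur tb : Int) (acc : List Int) : List Int :=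
  if h : tb ≤ cur then pvBaseLoop c (cur - 1) tb (acc ++ pvBaseConversion c cur tb) else acc
termination_by (cur + 1 - tb).toNat
decreasing_by omega

-- hash_chunks are the 1-character slices of hash_value, i.e. its characters
def unfold_hash_base_conversion_fixed (hash_value : String) (max_base : Int) (target_base : Int) : List Int :=
  hash_value.toList.foldl (fun ud c => ud ++ pvBaseLoop c max_base target_base []) []

-- ===== PORT B =====
def unfold_hash_base_conversion_fixed_alt (hash_value : String) (max_base : Int) (target_base : Int) : List Int :=
  let hi := min max_base 36
  hash_value.toList.foldl (fun ud c =>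
    -- int(ch, 36): digit value of the character, ValueError ↦ none
    match PySem.Int.ofCharsBase? [c] 36 with
    | none => ud
    | some v =>
      let count := hi - max (v + 1) target_base + 1
      if count ≤ 0 then ud
      else
        -- bits[::-1] * count
        ud ++ (List.replicate count.toNat (pvDigitsLoop v target_base []).reverse).flatten) []

-- ===== PRECONDITION & SPEC =====
-- Pre_ excludes target_base < 2, where A diverges (target_base = 1 with any convertible
-- positive digit), raises ZeroDivisionError (target_base = 0), or — for negative
-- target_base — returns a truncated pseudo-digit list that is an artefact of its
-- base-by-base probing (including Python's base-0 literal parsing), not a positional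
-- representation anyone would specify.
def Pre_unfold_hash_base_conversion_fixed (hash_value : String) (max_base : Int) (target_base : Int) : Prop :=
  2 ≤ target_base
instance (hash_value : String) (max_base : Int) (target_base : Int) : Decidable (Pre_unfold_hash_base_conversion_fixed hash_value max_base target_base) := by unfold Pre_unfold_hash_base_conversion_fixed; infer_instance

def pvWitness_unfold_hash_base_conversion_fixed : String × Int × Int := ("3f", 16, 2)

def Spec_unfold_hash_base_conversion_fixed (hash_value : String) (max_base : Int) (target_base : Int) (out : List Int) : Prop := out = unfold_hash_base_conversion_fixed_alt hash_value max_base target_base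
instance (hash_value : String) (max_base : Int) (target_base : Int) (out : List Int) : Decidable (Spec_unfold_hash_base_conversion_fixed hash_value max_base target_base out) := by unfold Spec_unfold_hash_base_conversion_fixed; infer_instance

-- ===== CLAIM (what is proved, stated in full; the proofs are below) =====
def Claim_equal_unfold_hash_base_conversion_fixed : Prop := ∀ (hash_value : String) (max_base : Int) (target_base : Int), Dom_unfold_hash_base_conversion_fixed hash_value max_base target_base → Pre_unfold_hash_base_conversion_fixed hash_value max_base target_base → Spec_unfold_hash_base_conversion_fixed hash_value max_base target_base (unfold_hash_base_conversion_fixed hash_value max_base target_base)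

-- ===== LEMMAS AND PROOFS =====

-- per-character value of B (proof-only abbreviation)
def pvPerB (c : Char) (mb tb : Int) : List Int :=
  match PySem.Int.ofCharsBase? [c] 36 with
  | none => []
  | some v => (List.replicate ((min mb 36 - max (v + 1) tb + 1).toNat) (pvDigitsLoop v tb []).reverse).flatten

-- int(c, k) for a single ASCII char and legal base k succeeds iff the char's digit
-- value (= int(c, 36)) is below k, returning that value (finite check over all cases)
set_option maxRecDepth 10000 in
set_option maxHeartbeats 2000000 in
theorem pv_tableEq : ∀ n : Nat, n < 128 → ∀ k : Nat, k < 37 → 2 ≤ k →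
    PySem.Int.ofCharsBase? [Char.ofNat n] (k : Int) =
      (PySem.Int.ofCharsBase? [Char.ofNat n] 36).bind (fun v => if v < (k : Int) then some v else none) := by decide

set_option maxRecDepth 10000 in
theorem pv_tableVal : ∀ n : Nat, n < 128 →
    (PySem.Int.ofCharsBase? [Char.ofNat n] 36).getD 0 ≥ 0 ∧
    (PySem.Int.ofCharsBase? [Char.ofNat n] 36).getD 0 < 36 := by decide

theorem pv_gt36 (c : Char) (b : Int) (hb : 36 < b) : PySem.Int.ofCharsBase? [c] b = none := by
  unfold PySem.Int.ofCharsBase?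
  rw [if_pos (by omega)]

theorem pv_ofChars_eq (c : Char) (hc : pvDomChar c = true) (b : Int) (hb2 : 2 ≤ b) (hb36 : b ≤ 36) :
    PySem.Int.ofCharsBase? [c] b =
      (PySem.Int.ofCharsBase? [c] 36).bind (fun v => if v < b then some v else none) := by
  have hn : c.toNat < 128 := by
    simp only [pvDomChar, Bool.or_eq_true, Bool.and_eq_true, decide_eq_true_eq, beq_iff_eq] at hc
    omega
  have hb : b = ((b.toNat : Nat) : Int) := by omega
  have := pv_tableEq c.toNat hn b.toNat (by omega) (by omega)
  rwa [Char.ofNat_toNat, ← hb] at this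

theorem pv_val_bounds (c : Char) (hc : pvDomChar c = true) (v : Int)
    (h : PySem.Int.ofCharsBase? [c] 36 = some v) : 0 ≤ v ∧ v < 36 := by
  have hn : c.toNat < 128 := by
    simp only [pvDomChar, Bool.or_eq_true, Bool.and_eq_true, decide_eq_true_eq, beq_iff_eq] at hc
    omega
  have := pv_tableVal c.toNat hn
  rw [Char.ofNat_toNat, h] at this
  simpa using this

theorem pvBaseLoop_acc (c : Char) (tb : Int) : ∀ (cur : Int) (acc : List Int),
    pvBaseLoop c cur tb acc = acc ++ pvBaseLoop c cur tb [] := by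
  intro cur acc
  generalize hn : (cur + 1 - tb).toNat = n
  induction n generalizing cur acc with
  | zero =>
    unfold pvBaseLoop
    rw [dif_neg (by omega), dif_neg (by omega)]
    simp
  | succ m ih =>
    by_cases h : tb ≤ cur
    · unfold pvBaseLoop
      rw [dif_pos h, dif_pos h]
      rw [ih (cur - 1) _ (by omega), ih (cur - 1) ([] ++ pvBaseConversion c cur tb) (by omega)]
      simp
    · unfold pvBaseLoop
      rw [dif_neg h, dif_neg h]
      simp

theorem pvPerA_eq (c : Char) (hc : pvDomChar c = true) (tb : Int) (htb : 2 ≤ tb) :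
    ∀ (mb : Int), pvBaseLoop c mb tb [] = pvPerB c mb tb := by
  intro mb
  generalize hn : (mb + 1 - tb).toNat = n
  induction n generalizing mb with
  | zero =>
    unfold pvBaseLoop
    rw [dif_neg (by omega)]
    unfold pvPerB
    cases h36 : PySem.Int.ofCharsBase? [c] 36 with
    | none => simp
    | some v =>
      have hv := pv_val_bounds c hc v h36
      have hz : (min mb 36 - max (v + 1) tb + 1).toNat = 0 := by omega
      simp [hz]
  | succ m ih =>
    by_cases h : tb ≤ mb
    · unfold pvBaseLoop
      rw [dif_pos h, pvBaseLoop_acc, List.nil_append]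
      rw [ih (mb - 1) (by omega)]
      unfold pvPerB pvBaseConversion
      cases h36 : PySem.Int.ofCharsBase? [c] 36 with
      | none =>
        have hcur : PySem.Int.ofCharsBase? [c] mb = none := by
          by_cases h36' : mb ≤ 36
          · rw [pv_ofChars_eq c hc mb (by omega) h36', h36]; rfl
          · exact pv_gt36 c mb (by omega)
        simp [hcur]
      | some v =>
        have hv := pv_val_bounds c hc v h36
        by_cases hok : v < mb ∧ mb ≤ 36
        · have hcur : PySem.Int.ofCharsBase? [c] mb = some v := by
            rw [pv_ofChars_eq c hc mb (by omega) hok.2, h36]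
            simp [hok.1]
          have hcnt : (min mb 36 - max (v + 1) tb + 1).toNat
              = (min (mb - 1) 36 - max (v + 1) tb + 1).toNat + 1 := by omega
          simp only [hcur]
          simp [hcnt, List.replicate_succ]
        · have hcur : PySem.Int.ofCharsBase? [c] mb = none := by
            by_cases h36' : mb ≤ 36
            · rw [pv_ofChars_eq c hc mb (by omega) h36', h36]
              have : ¬ v < mb := fun hv' => hok ⟨hv', h36'⟩
              simp [this]
            · exact pv_gt36 c mb (by omega)
          have hcnt : (min mb 36 - max (v + 1) tb + 1).toNat
              = (min (mb - 1) 36 - max (v + 1) tb + 1).toNat := by omega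
          simp [hcur, hcnt]
    · omega

theorem pvStepB_eq (c : Char) (mb tb : Int) (ud : List Int) :
    (match PySem.Int.ofCharsBase? [c] 36 with
     | none => ud
     | some v =>
       if min mb 36 - max (v + 1) tb + 1 ≤ 0 then ud
       else ud ++ (List.replicate (min mb 36 - max (v + 1) tb + 1).toNat
              (pvDigitsLoop v tb []).reverse).flatten)
      = ud ++ pvPerB c mb tb := by
  unfold pvPerB
  cases h36 : PySem.Int.ofCharsBase? [c] 36 with
  | none => simp
  | some v =>
    by_cases hle : min mb 36 - max (v + 1) tb + 1 ≤ 0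
    · have hz : (min mb 36 - max (v + 1) tb + 1).toNat = 0 := by omega
      simp [hle, hz]
    · simp [hle]

-- ===== VERDICT (by name: the statement is the Claim_ definition above) =====
theorem unfold_hash_base_conversion_fixed_spec : Claim_equal_unfold_hash_base_conversion_fixed := by
  intro hash_value max_base target_base hdom hpre
  unfold Spec_unfold_hash_base_conversion_fixed
  have htb : 2 ≤ target_base := hpre
  have hall : ∀ c ∈ hash_value.toList, pvDomChar c = true := by
    simp only [Dom_unfold_hash_base_conversion_fixed, pvDomStr, Bool.and_eq_true] at hdom
    exact fun c hc => List.all_eq_true.mp hdom.1.1 c hc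
  unfold unfold_hash_base_conversion_fixed unfold_hash_base_conversion_fixed_alt
  suffices h : ∀ (l : List Char), (∀ c ∈ l, pvDomChar c = true) → ∀ acc : List Int,
      l.foldl (fun ud c => ud ++ pvBaseLoop c max_base target_base []) acc
        = l.foldl (fun ud c =>
            match PySem.Int.ofCharsBase? [c] 36 with
            | none => ud
            | some v =>
              if min max_base 36 - max (v + 1) target_base + 1 ≤ 0 then ud
              else ud ++ (List.replicate (min max_base 36 - max (v + 1) target_base + 1).toNat
                     (pvDigitsLoop v target_base []).reverse).flatten) acc by
    exact h hash_value.toList hall []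
  intro l hl
  induction l with
  | nil => intro acc; rfl
  | cons c t iht =>
    intro acc
    have hc : pvDomChar c = true := hl c (by simp)
    simp only [List.foldl_cons]
    rw [pvPerA_eq c hc target_base htb max_base, pvStepB_eq c max_base target_base acc]
    exact iht (fun c' hc' => hl c' (by simp [hc'])) _
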